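-- pv_equiv track=rewrite | github.com/agustincatalano/py_frame | PyFrame/reports/report_utils.py | get_status_traceability
-- ===== SOURCE A (Python) =====
-- def get_status_traceability(stories):
--     """
--     This function return dict with status the Number with format for file config
--     :param stories: all stories for traceability
--     :return: dict with status for each Number
--     """
--     dict_status = {}
--     for key, story in stories.items():
--         passed = all([scenary['status'] in ('passed', 'skipped')
--                       for scenary in story])
--         if passed:
--             passed = any([scenary['status'] == 'passed' for scenary in story])
--             dict_status[key] = 'passed' if passed else 'skipped'
--         else:
--             dict_status[key] = 'failed'
--     return dict_status
-- ===== SOURCE B (Python) =====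
-- _RANK = {'skipped': 0, 'passed': 1}
-- _LABELS = ('skipped', 'passed', 'failed')
--
--
-- def get_status_traceability(stories):
--     result = {}
--     for key, story in stories.items():
--         worst = 0
--         for sc in story:
--             worst = max(worst, _RANK.get(sc['status'], 2))
--         result[key] = _LABELS[worst]
--     return result
-- ===== Notes on version B (the rewrite author's own statement) =====
-- stated objective: simpler
-- what changed: Replaces the two boolean scans per story (all-in-tuple then any-equals) and the branch chain by a single fold taking the maximum numeric severity rank (skipped=0, passed=1, other=2) and indexing a label table.
import Mathlib
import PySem

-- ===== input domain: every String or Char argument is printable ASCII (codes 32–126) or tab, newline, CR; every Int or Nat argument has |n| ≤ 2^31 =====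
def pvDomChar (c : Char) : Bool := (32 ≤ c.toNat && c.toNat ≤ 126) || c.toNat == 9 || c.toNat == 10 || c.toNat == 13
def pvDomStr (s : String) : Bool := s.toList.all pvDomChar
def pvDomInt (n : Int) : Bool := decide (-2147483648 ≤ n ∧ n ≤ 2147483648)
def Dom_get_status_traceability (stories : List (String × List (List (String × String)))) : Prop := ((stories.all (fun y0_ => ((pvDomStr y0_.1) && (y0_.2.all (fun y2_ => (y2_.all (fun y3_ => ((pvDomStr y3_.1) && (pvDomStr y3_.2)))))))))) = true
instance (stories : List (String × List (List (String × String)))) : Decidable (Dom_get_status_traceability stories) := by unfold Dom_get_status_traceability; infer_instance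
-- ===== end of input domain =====

-- B replaces A's two per-story boolean scans (all-in-tuple, then any-equals) by one fold taking
-- the maximum numeric severity rank (skipped=0 < passed=1 < other=2) and a label table lookup
-- (objective: simpler).

-- ===== PORT A =====
-- scenary['status'] (KeyError excluded by Pre_; the default "" is never reached under Pre_)
def pvStatus (sc : List (String × String)) : String :=
  (PySem.Dict.ofList sc).getD "status" ""

def get_status_traceability (stories : List (String × List (List (String × String)))) : List (String × String) :=
  (stories.foldl
    (fun dict_status kv =>
      let story := kv.2
      let passed := story.all (fun scenary => ["passed", "skipped"].contains (pvStatus scenary))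
      if passed then
        let passed2 := story.any (fun scenary => pvStatus scenary == "passed")
        dict_status.insert kv.1 (if passed2 then "passed" else "skipped")
      else
        dict_status.insert kv.1 "failed")
    PySem.Dict.empty).items

-- ===== PORT B =====
-- _RANK.get(sc['status'], 2)
def pvRank (s : String) : Nat :=
  (PySem.Dict.ofList [("skipped", 0), ("passed", 1)]).getD s 2

def pvLabels : List String := ["skipped", "passed", "failed"]

def get_status_traceability_alt (stories : List (String × List (List (String × String)))) : List (String × String) :=
  (stories.foldl
    (fun result kv =>
      let worst := kv.2.foldl (fun w sc => max w (pvRank (pvStatus sc))) 0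
      -- _LABELS[worst]: worst ≤ 2 by construction, so the plain index never falls outside
      result.insert kv.1 (pvLabels.getD worst ""))
    PySem.Dict.empty).items

-- ===== PRECONDITION & SPEC =====
-- Pre_ excludes exactly the inputs where A raises KeyError: a scenario dict without a 'status' key.
def Pre_get_status_traceability (stories : List (String × List (List (String × String)))) : Prop :=
  ∀ kv ∈ stories, ∀ sc ∈ kv.2, "status" ∈ sc.map Prod.fst
instance (stories : List (String × List (List (String × String)))) : Decidable (Pre_get_status_traceability stories) := by unfold Pre_get_status_traceability; infer_instance
def pvWitness_get_status_traceability : (List (String × List (List (String × String)))) :=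
  [("US-1", [[("status", "passed")], [("status", "skipped")]]), ("US-2", [])]

def Spec_get_status_traceability (stories : List (String × List (List (String × String)))) (out : List (String × String)) : Prop := out = get_status_traceability_alt stories
instance (stories : List (String × List (List (String × String)))) (out : List (String × String)) : Decidable (Spec_get_status_traceability stories out) := by unfold Spec_get_status_traceability; infer_instance

-- ===== CLAIM (what is proved, stated in full; the proofs are below) =====
def Claim_equal_get_status_traceability : Prop := ∀ (stories : List (String × List (List (String × String)))), Dom_get_status_traceability stories → Pre_get_status_traceability stories → Spec_get_status_traceability stories (get_status_traceability stories)

-- ===== LEMMAS AND PROOFS =====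

-- pvRank spelled out as an if-chain
lemma pvRank_eq (s : String) :
    pvRank s = if s == "skipped" then 0 else if s == "passed" then 1 else 2 := by
  simp [pvRank, PySem.Dict.ofList, PySem.Dict.getD, PySem.Dict.get?, PySem.Dict.insert,
    PySem.Dict.update, PySem.Dict.empty, PySem.Dict.contains, List.find?]
  by_cases h1 : s = "skipped"
  · simp [h1]
  · rw [beq_eq_false_iff_ne.mpr (Ne.symm h1)]
    by_cases h2 : s = "passed"
    · simp [h2]
    · rw [beq_eq_false_iff_ne.mpr (Ne.symm h2)]
      simp [h1, h2]

-- the max-fold with any initial accumulator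
lemma pvFold_max (l : List String) (w : Nat) :
    l.foldl (fun w s => max w (pvRank s)) w
      = max w (l.foldl (fun w s => max w (pvRank s)) 0) := by
  induction l generalizing w with
  | nil => simp
  | cons s t ih =>
    simp only [List.foldl_cons]
    rw [ih (max w (pvRank s)), ih (max 0 (pvRank s))]
    omega

-- characterisation of the max of ranks by A's two scans
lemma pvWorst_char (l : List String) :
    l.foldl (fun w s => max w (pvRank s)) 0
      = if l.all (fun s => ["passed", "skipped"].contains s) then
          (if l.any (fun s => s == "passed") then 1 else 0)
        else 2 := by
  induction l with
  | nil => simp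
  | cons s t ih =>
    simp only [List.foldl_cons, List.all_cons, List.any_cons]
    rw [pvFold_max, ih, pvRank_eq]
    by_cases h1 : s = "passed" <;> by_cases h2 : s = "skipped" <;>
      simp [h1, h2] <;> split_ifs <;> simp_all

-- per-story: A's label and B's label coincide (for any status list l)
lemma pvLabel_eq (l : List String) :
    (if l.all (fun s => ["passed", "skipped"].contains s) then
       (if l.any (fun s => s == "passed") then "passed" else "skipped")
     else "failed")
    = pvLabels.getD (l.foldl (fun w s => max w (pvRank s)) 0) "" := by
  rw [pvWorst_char]
  split_ifs <;> simp [pvLabels]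

-- the two loop bodies are the same function
lemma pvStep_eq :
    (fun (dict_status : PySem.Dict String String) (kv : String × List (List (String × String))) =>
      let story := kv.2
      let passed := story.all (fun scenary => ["passed", "skipped"].contains (pvStatus scenary))
      if passed then
        let passed2 := story.any (fun scenary => pvStatus scenary == "passed")
        dict_status.insert kv.1 (if passed2 then "passed" else "skipped")
      else
        dict_status.insert kv.1 "failed")
    = (fun result kv =>
      let worst := kv.2.foldl (fun w sc => max w (pvRank (pvStatus sc))) 0
      result.insert kv.1 (pvLabels.getD worst "")) := by
  funext d kv
  simp only [← apply_ite (d.insert kv.1)]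
  congr 1
  have := pvLabel_eq (kv.2.map pvStatus)
  simpa [List.all_map, List.any_map, List.foldl_map, Function.comp] using this

-- ===== VERDICT (by name: the statement is the Claim_ definition above) =====
theorem get_status_traceability_spec : Claim_equal_get_status_traceability := by
  intro stories _ _
  unfold Spec_get_status_traceability get_status_traceability get_status_traceability_alt
  rw [pvStep_eq]
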